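-- pv_equiv track=rewrite | github.com/SeungjipLee/Algorithm | 이승집/24.09/240902/Pro_Lv2.조이스틱.py | solution
-- ===== SOURCE A (Python) =====
-- def solution(name):
--     def min_updown(c):
--         return min(ord(c) - ord('A'), ord('Z') - ord(c) + 1)
--
--     N = len(name)
--     answer = 0
--
--     for char in name:
--         answer += min_updown(char)
--
--     move = N - 1
--
--     for i in range(N):
--         right = i + 1
--         while right < N and name[right] == "A":
--             right += 1
--
--         dist = i + N - right + min(i, N - right)
--         move = min(move, dist)
--
--     answer += move
--     return answer
-- ===== SOURCE B (Python) =====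
-- def solution(name):
--     N = len(name)
--     answer = sum(min(ord(c) - 65, 91 - ord(c)) for c in name)
--     # nxt[j] = smallest index k >= j with name[k] != 'A', or N if none
--     nxt = [N] * (N + 1)
--     for i in range(N - 1, -1, -1):
--         nxt[i] = i if name[i] != 'A' else nxt[i + 1]
--     move = N - 1
--     for i in range(N):
--         right = nxt[i + 1]
--         move = min(move, i + N - right + min(i, N - right))
--     return answer + move
-- ===== Notes on version B (the rewrite author's own statement) =====
-- stated objective: alternative
-- what changed: Replaces A's per-position inner while-scan for the next non-'A' character with a next-index array precomputed in one backward pass, so the move loop does no inner scanning (worst case O(n) vs A's O(n^2), though typical inputs have short 'A'-runs).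
import Mathlib
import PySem

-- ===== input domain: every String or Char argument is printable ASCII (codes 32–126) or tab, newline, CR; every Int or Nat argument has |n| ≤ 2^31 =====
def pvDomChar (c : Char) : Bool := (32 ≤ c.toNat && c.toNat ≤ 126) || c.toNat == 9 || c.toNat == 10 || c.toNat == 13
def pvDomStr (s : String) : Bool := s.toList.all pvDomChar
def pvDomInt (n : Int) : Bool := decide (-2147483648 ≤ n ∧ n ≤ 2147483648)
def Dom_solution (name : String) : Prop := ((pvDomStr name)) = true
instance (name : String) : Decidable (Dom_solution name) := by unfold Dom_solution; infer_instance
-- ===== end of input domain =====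

-- B replaces A's inner while-scan for the next non-'A' letter by a precomputed
-- next-index array built in one backward pass (alternative algorithm, same result).


-- ===== PORT A =====
-- min_updown(c) = min(ord(c)-ord('A'), ord('Z')-ord(c)+1)
def pyMinUpdown (c : Char) : Int :=
  min ((c.toNat : Int) - 65) (90 - (c.toNat : Int) + 1)

-- the inner 'while right < N and name[right] == "A": right += 1' loop
def skipA (cs : List Char) (N : Nat) (right : Nat) : Nat :=
  if h : right < N ∧ cs.getD right ' ' = 'A' then skipA cs N (right + 1) else right
termination_by N - right
decreasing_by omega

def solution (name : String) : Int :=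
  let cs := name.toList
  let N := cs.length
  let answer := cs.foldl (fun a c => a + pyMinUpdown c) 0
  let move := (List.range N).foldl
    (fun m i =>
      let right := skipA cs N (i + 1)
      let dist : Int := (i : Int) + (N : Int) - (right : Int) +
        min (i : Int) ((N : Int) - (right : Int))
      min m dist) ((N : Int) - 1)
  answer + move

-- ===== PORT B =====
-- builds the suffix of the nxt array for positions i, i+1, …: nxt[i] is i if
-- the char there is not 'A', else nxt[i+1]; the last entry (position N) is N.
def buildNxt (cs : List Char) (i : Nat) : List Nat :=
  match cs with
  | [] => [i]
  | c :: rest =>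
    let tail := buildNxt rest (i + 1)
    (if c ≠ 'A' then i else tail.headD (i + 1)) :: tail

def solution_alt (name : String) : Int :=
  let cs := name.toList
  let N := cs.length
  let answer := cs.foldl (fun a c => a + min ((c.toNat : Int) - 65) (91 - (c.toNat : Int))) 0
  let nxt := buildNxt cs 0
  let move := (List.range N).foldl
    (fun m i =>
      let right := nxt.getD (i + 1) N
      min m ((i : Int) + (N : Int) - (right : Int) +
        min (i : Int) ((N : Int) - (right : Int)))) ((N : Int) - 1)
  answer + move

-- ===== PRECONDITION & SPEC =====
def Spec_solution (name : String) (out : Int) : Prop := out = solution_alt name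
instance (name : String) (out : Int) : Decidable (Spec_solution name out) := by unfold Spec_solution; infer_instance

-- ===== CLAIM (what is proved, stated in full; the proofs are below) =====
def Claim_equal_solution : Prop := ∀ (name : String), Dom_solution name → Spec_solution name (solution name)

-- ===== LEMMAS AND PROOFS =====

-- length of the leading run of 'A's
def leadA : List Char → Nat
  | [] => 0
  | c :: r => if c = 'A' then leadA r + 1 else 0

theorem skipA_eq (cs : List Char) (j : Nat) (h : j ≤ cs.length) :
    skipA cs cs.length j = j + leadA (cs.drop j) := by
  rw [skipA]
  by_cases hj : j < cs.length
  · have hget : cs.getD j ' ' = cs[j] := List.getD_eq_getElem cs ' ' hj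
    have hdrop : cs.drop j = cs[j] :: cs.drop (j + 1) := List.drop_eq_getElem_cons hj
    by_cases hA : cs[j] = 'A'
    · rw [dif_pos ⟨hj, by rw [hget, hA]⟩]
      rw [skipA_eq cs (j + 1) (by omega), hdrop, hA]
      simp [leadA]; omega
    · rw [dif_neg (by rw [hget]; exact fun hc => hA hc.2)]
      rw [hdrop]
      simp [leadA, hA]
  · have : j = cs.length := by omega
    subst this
    rw [dif_neg (by omega)]
    simp [leadA]
termination_by cs.length - j
decreasing_by omega

theorem buildNxt_getD (cs : List Char) (i j : Nat) (h : j ≤ cs.length) (d : Nat) :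
    (buildNxt cs i).getD j d = i + j + leadA (cs.drop j) := by
  induction cs generalizing i j with
  | nil =>
    have : j = 0 := by simpa using h
    subst this; simp [buildNxt, leadA]
  | cons c rest ih =>
    cases j with
    | zero =>
      by_cases hA : c = 'A'
      · cases hbn : buildNxt rest (i + 1) with
        | nil => cases rest <;> simp [buildNxt] at hbn
        | cons a t =>
          have ha : a = (i + 1) + 0 + leadA (rest.drop 0) := by
            rw [← List.getD_cons_zero (d := d) (x := a) (xs := t), ← hbn]
            exact ih (i + 1) 0 (by omega)
          simp only [buildNxt, hA, ne_eq, not_true_eq_false, if_false, hbn,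
            List.headD_cons, List.getD_cons_zero]
          simp only [List.drop_zero] at ha ⊢
          rw [ha]
          simp [leadA]; omega
      · simp [buildNxt, hA, leadA]
    | succ k =>
      simp only [buildNxt, List.getD_cons_succ, List.drop_succ_cons]
      rw [ih (i + 1) k (by simpa using h)]
      omega

theorem solution_spec : Claim_equal_solution := by
  intro name _
  unfold Spec_solution solution solution_alt
  simp only []
  set cs := name.toList with hcs
  congr 1
  · -- answers: the two fold functions agree
    have : (fun (a : Int) (c : Char) => a + pyMinUpdown c)
        = (fun (a : Int) (c : Char) => a + min ((c.toNat : Int) - 65) (91 - (c.toNat : Int))) := by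
      funext a c
      unfold pyMinUpdown
      congr 1
      omega
    rw [this]
  · -- moves: the right endpoints agree for every i in range N
    apply PySem.List.foldl_congr_mem
    intro m i hi
    have hiN : i < cs.length := List.mem_range.mp hi
    have : skipA cs cs.length (i + 1) = (buildNxt cs 0).getD (i + 1) cs.length := by
      rw [skipA_eq cs (i + 1) (by omega), buildNxt_getD cs 0 (i + 1) (by omega)]
      omega
    rw [this]
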